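-- pv_equiv track=rewrite | github.com/tfcc13/FEUP_FP_1Y1S | PG/P12 /Four in a line.py | four_in_line
-- ===== SOURCE A (Python) =====
-- def four_in_line(board):
--
--     w = set()
--
--     for c in range(len(board[0])-3):
--         for r in range(len(board)):
--             if board[r][c] == board[r][c+1] == board[r][c+2] == board[r][c+3] != 0:
--                 w.add((r,c))
--                 w.add((r, c+3))
--
--     for c in range(len(board[0])):
--         for r in range(len(board)-3):
--             if board[r][c] == board[r+1][c] == board[r+2][c] == board[r+3][c] != 0:
--                 w.add((r,c))
--                 w.add((r+3,c))
--
--     for c in range(len(board[0])-3):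
--
--         for r in range(len(board)-3):
--             if board[r][c] == board[r+1][c+1] == board[r+2][c+2] == board[r+3][c+3] != 0:
--                 w.add((r,c))
--                 w.add((r+3,c+3))
--
--     for c in range(len(board[0])-3):
--         for r in range(3, len(board)):
--             if board[r][c] == board[r-1][c+1] == board[r-2][c+2] == board[r-3][c+3] != 0:
--                 w.add((r,c))
--                 w.add((r-3,c+3))
--
--     return w
-- ===== SOURCE B (Python) =====
-- def four_in_line(board):
--     h, w = len(board), len(board[0])
--     dirs = ((0, 1), (1, 0), (1, 1), (-1, 1))
--     # dynamic programming: run[(dr,dc,r,c)] = length of the maximal streak of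
--     # equal nonzero cells ENDING at (r,c) along direction (dr,dc)
--     run = {}
--     for c in range(w):
--         for r in range(h):
--             for dr, dc in dirs:
--                 v = board[r][c]
--                 pr, pc = r - dr, c - dc
--                 if v == 0:
--                     run[(dr, dc, r, c)] = 0
--                 elif 0 <= pr < h and 0 <= pc < w and board[pr][pc] == v:
--                     run[(dr, dc, r, c)] = run[(dr, dc, pr, pc)] + 1
--                 else:
--                     run[(dr, dc, r, c)] = 1
--     out = set()
--     for dr, dc in dirs:
--         for c in range(w if (dr, dc) == (1, 0) else w - 3):
--             for r in range(3 if dr < 0 else 0, h if dr <= 0 else h - 3):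
--                 if run[(dr, dc, r + 3 * dr, c + 3 * dc)] >= 4:
--                     out.add((r, c))
--                     out.add((r + 3 * dr, c + 3 * dc))
--     return out
-- ===== Notes on version B (the rewrite author's own statement) =====
-- stated objective: alternative
-- what changed: Replaces A's direct re-comparison of the four cells of every window in four direction-major scans by a dynamic-programming run-length table (streak of equal nonzero cells ending at each cell, per direction) built in one cell-major pass, after which each window is accepted by a single table lookup >= 4.
-- outside the precondition, e.g. on four_in_line([[1, 0, 2, 2], [2, 1, 0]]): A returns set(), B raises IndexError
import Mathlib
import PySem

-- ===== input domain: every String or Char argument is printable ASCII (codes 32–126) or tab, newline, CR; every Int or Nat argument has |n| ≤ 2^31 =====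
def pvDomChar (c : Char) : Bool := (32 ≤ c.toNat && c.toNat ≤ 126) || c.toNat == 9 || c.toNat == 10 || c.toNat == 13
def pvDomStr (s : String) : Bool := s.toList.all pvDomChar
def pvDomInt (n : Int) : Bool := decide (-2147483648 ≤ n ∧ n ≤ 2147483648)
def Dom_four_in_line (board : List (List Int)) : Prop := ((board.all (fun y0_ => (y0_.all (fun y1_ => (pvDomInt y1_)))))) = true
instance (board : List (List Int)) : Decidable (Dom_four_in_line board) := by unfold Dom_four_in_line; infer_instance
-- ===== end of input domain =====

-- B replaces A's direct re-comparison of every 4-cell window by a dynamic-programming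
-- run-length table (streak of equal nonzero cells ending at each cell, per direction),
-- built in one cell-major pass and then only tested against 4; objective: alternative.

-- board[r][c] (total form; indices are in range wherever the ports read them under Pre_)
def pvCell (board : List (List Int)) (r c : Int) : Int :=
  PySem.List.pyGetD (PySem.List.pyGetD board r []) c 0

-- ===== PORT A =====
def four_in_line (board : List (List Int)) : List (Int × Int) :=
  let w0 : PySem.Set (Int × Int) := PySem.Set.empty
  let w1 := (PySem.List.pyRange 0 (((PySem.List.pyGetD board 0 []).length : Int) - 3) 1).foldl (fun w c =>
    (PySem.List.pyRange 0 (board.length : Int) 1).foldl (fun w r =>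
      if pvCell board r c = pvCell board r (c+1) ∧ pvCell board r (c+1) = pvCell board r (c+2) ∧
         pvCell board r (c+2) = pvCell board r (c+3) ∧ pvCell board r (c+3) ≠ 0
      then PySem.Set.add (PySem.Set.add w (r, c)) (r, c+3) else w) w) w0
  let w2 := (PySem.List.pyRange 0 ((PySem.List.pyGetD board 0 []).length : Int) 1).foldl (fun w c =>
    (PySem.List.pyRange 0 ((board.length : Int) - 3) 1).foldl (fun w r =>
      if pvCell board r c = pvCell board (r+1) c ∧ pvCell board (r+1) c = pvCell board (r+2) c ∧
         pvCell board (r+2) c = pvCell board (r+3) c ∧ pvCell board (r+3) c ≠ 0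
      then PySem.Set.add (PySem.Set.add w (r, c)) (r+3, c) else w) w) w1
  let w3 := (PySem.List.pyRange 0 (((PySem.List.pyGetD board 0 []).length : Int) - 3) 1).foldl (fun w c =>
    (PySem.List.pyRange 0 ((board.length : Int) - 3) 1).foldl (fun w r =>
      if pvCell board r c = pvCell board (r+1) (c+1) ∧ pvCell board (r+1) (c+1) = pvCell board (r+2) (c+2) ∧
         pvCell board (r+2) (c+2) = pvCell board (r+3) (c+3) ∧ pvCell board (r+3) (c+3) ≠ 0
      then PySem.Set.add (PySem.Set.add w (r, c)) (r+3, c+3) else w) w) w2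
  let w4 := (PySem.List.pyRange 0 (((PySem.List.pyGetD board 0 []).length : Int) - 3) 1).foldl (fun w c =>
    (PySem.List.pyRange 3 (board.length : Int) 1).foldl (fun w r =>
      if pvCell board r c = pvCell board (r-1) (c+1) ∧ pvCell board (r-1) (c+1) = pvCell board (r-2) (c+2) ∧
         pvCell board (r-2) (c+2) = pvCell board (r-3) (c+3) ∧ pvCell board (r-3) (c+3) ≠ 0
      then PySem.Set.add (PySem.Set.add w (r, c)) (r-3, c+3) else w) w) w3
  w4

-- ===== PORT B =====
-- the direction table
def pvDirs : List (Int × Int) := [(0, 1), (1, 0), (1, 1), (-1, 1)]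

-- one body of B's innermost loop: record the run length of cell (r,c) along d
def pvStep (board : List (List Int)) (h w r c : Int)
    (run : PySem.Dict (Int × Int × Int × Int) Int) (d : Int × Int) :
    PySem.Dict (Int × Int × Int × Int) Int :=
  if pvCell board r c = 0 then run.insert (d.1, d.2, r, c) 0
  else if 0 ≤ r - d.1 ∧ r - d.1 < h ∧ 0 ≤ c - d.2 ∧ c - d.2 < w ∧
          pvCell board (r - d.1) (c - d.2) = pvCell board r c
  then run.insert (d.1, d.2, r, c) (run.getD (d.1, d.2, r - d.1, c - d.2) 0 + 1)
  else run.insert (d.1, d.2, r, c) 1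

-- B phase 1: the run-length table, one cell-major pass
def pvBuild (board : List (List Int)) (h w : Int) : PySem.Dict (Int × Int × Int × Int) Int :=
  (PySem.List.pyRange 0 w 1).foldl (fun run c =>
    (PySem.List.pyRange 0 h 1).foldl (fun run r =>
      pvDirs.foldl (pvStep board h w r c) run) run) PySem.Dict.empty

def four_in_line_alt (board : List (List Int)) : List (Int × Int) :=
  let h : Int := (board.length : Int)
  let w : Int := ((PySem.List.pyGetD board 0 []).length : Int)
  let run := pvBuild board h w
  pvDirs.foldl (fun out d =>
    (PySem.List.pyRange 0 (if d = ((1 : Int), (0 : Int)) then w else w - 3) 1).foldl (fun out c =>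
      (PySem.List.pyRange (if d.1 < 0 then 3 else 0) (if d.1 ≤ 0 then h else h - 3) 1).foldl (fun out r =>
        if 4 ≤ run.getD (d.1, d.2, r + 3 * d.1, c + 3 * d.2) 0
        then PySem.Set.add (PySem.Set.add out (r, c)) (r + 3 * d.1, c + 3 * d.2)
        else out) out) out) PySem.Set.empty

-- ===== PRECONDITION & SPEC =====
-- Pre_ excludes the boards on which the Pythons can raise IndexError: the empty board
-- (board[0]) and ragged boards with a row shorter than row 0 — on some of those A's
-- chained comparison short-circuits past the missing cell and still returns, but B's
-- table-building pass reads every cell and raises, so they are excluded wholesale.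
def Pre_four_in_line (board : List (List Int)) : Prop :=
  board ≠ [] ∧ ∀ row ∈ board, (board.headD []).length ≤ row.length
instance (board : List (List Int)) : Decidable (Pre_four_in_line board) := by unfold Pre_four_in_line; infer_instance
def pvWitness_four_in_line : List (List Int) :=
  [[1,1,1,1],[0,2,0,0],[2,0,1,0],[1,2,2,1]]

def Spec_four_in_line (board : List (List Int)) (out : List (Int × Int)) : Prop := out = four_in_line_alt board
instance (board : List (List Int)) (out : List (Int × Int)) : Decidable (Spec_four_in_line board out) := by unfold Spec_four_in_line; infer_instance

-- ===== CLAIM (what is proved, stated in full; the proofs are below) =====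
def Claim_equal_four_in_line : Prop := ∀ (board : List (List Int)), Dom_four_in_line board → Pre_four_in_line board → Spec_four_in_line board (four_in_line board)

-- ===== LEMMAS AND PROOFS =====

-- direction k of the table (out-of-range defaults to (0,1); only k < 4 is used)
def pvDir (k : Nat) : Int × Int := pvDirs.getD k (0, 1)

lemma pvDir_bound (k : Nat) : 1 ≤ 2 * (pvDir k).2 + (pvDir k).1 := by
  match k with
  | 0 | 1 | 2 | 3 => decide
  | (n+4) => simp [pvDir, pvDirs, List.getD]

-- specification of B's table: run length of equal nonzero cells ending at (r,c) along pvDir k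
def pvR (board : List (List Int)) (h w : Int) (k : Nat) (r c : Int) : Int :=
  if 0 ≤ r ∧ r < h ∧ 0 ≤ c ∧ c < w then
    if pvCell board r c = 0 then 0
    else if h' : 0 ≤ r - (pvDir k).1 ∧ r - (pvDir k).1 < h ∧ 0 ≤ c - (pvDir k).2 ∧ c - (pvDir k).2 < w ∧
            pvCell board (r - (pvDir k).1) (c - (pvDir k).2) = pvCell board r c
    then pvR board h w k (r - (pvDir k).1) (c - (pvDir k).2) + 1
    else 1
  else 0
termination_by (2 * c + r).toNat
decreasing_by
  have hb := pvDir_bound k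
  omega

lemma pvR_eq (board : List (List Int)) (h w : Int) (k : Nat) (r c : Int) :
    pvR board h w k r c =
      if 0 ≤ r ∧ r < h ∧ 0 ≤ c ∧ c < w then
        if pvCell board r c = 0 then 0
        else if _h' : 0 ≤ r - (pvDir k).1 ∧ r - (pvDir k).1 < h ∧ 0 ≤ c - (pvDir k).2 ∧ c - (pvDir k).2 < w ∧
                pvCell board (r - (pvDir k).1) (c - (pvDir k).2) = pvCell board r c
        then pvR board h w k (r - (pvDir k).1) (c - (pvDir k).2) + 1
        else 1
      else 0 := by
  conv_lhs => rw [pvR]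

lemma pvR_nonneg (board : List (List Int)) (h w : Int) (k : Nat) (r c : Int) :
    0 ≤ pvR board h w k r c := by
  have H : ∀ m : Nat, ∀ r c : Int, (2 * c + r).toNat = m → 0 ≤ pvR board h w k r c := by
    intro m
    induction m using Nat.strong_induction_on with
    | _ m ih =>
      intro r c hm
      rw [pvR_eq]
      have hb := pvDir_bound k
      split_ifs with h1 h2 h3
      · omega
      · have := ih ((2 * (c - (pvDir k).2) + (r - (pvDir k).1)).toNat) (by omega)
          (r - (pvDir k).1) (c - (pvDir k).2) rfl
        omega
      · omega
      · omega
  exact H _ r c rfl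

-- one unfolding of pvR, phrased for thresholds
lemma pvR_ge_iff (board : List (List Int)) (h w : Int) (k : Nat) (r c n : Int) (hn : 1 ≤ n) :
    n ≤ pvR board h w k r c ↔
      (0 ≤ r ∧ r < h ∧ 0 ≤ c ∧ c < w) ∧ pvCell board r c ≠ 0 ∧
        (n = 1 ∨ ((0 ≤ r - (pvDir k).1 ∧ r - (pvDir k).1 < h ∧ 0 ≤ c - (pvDir k).2 ∧ c - (pvDir k).2 < w ∧
                    pvCell board (r - (pvDir k).1) (c - (pvDir k).2) = pvCell board r c) ∧
                  n - 1 ≤ pvR board h w k (r - (pvDir k).1) (c - (pvDir k).2))) := by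
  rw [pvR_eq]
  have hnn := pvR_nonneg board h w k (r - (pvDir k).1) (c - (pvDir k).2)
  split_ifs with h1 h2 h3
  · constructor
    · intro hle; omega
    · rintro ⟨-, hv, -⟩; exact absurd h2 hv
  · constructor
    · intro hle
      exact ⟨h1, fun hv => (by omega : False), Or.inr ⟨h3, by omega⟩⟩
    · rintro ⟨-, -, hcase⟩
      rcases hcase with h4 | ⟨-, h5⟩ <;> omega
  · constructor
    · intro hle
      exact ⟨h1, fun hv => (by omega : False), Or.inl (by omega)⟩
    · rintro ⟨-, -, hcase⟩
      rcases hcase with h4 | ⟨h5, -⟩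
      · omega
      · exact absurd h5 h3
  · constructor
    · intro hle; omega
    · rintro ⟨hg, -, -⟩; exact absurd hg h1

lemma getD_pvStep (board : List (List Int)) (h w r c : Int)
    (run : PySem.Dict (Int × Int × Int × Int) Int) (d : Int × Int) (key : Int × Int × Int × Int) :
    (pvStep board h w r c run d).getD key 0 =
      if key = (d.1, d.2, r, c) then
        (if pvCell board r c = 0 then 0
         else if 0 ≤ r - d.1 ∧ r - d.1 < h ∧ 0 ≤ c - d.2 ∧ c - d.2 < w ∧
                 pvCell board (r - d.1) (c - d.2) = pvCell board r c
         then run.getD (d.1, d.2, r - d.1, c - d.2) 0 + 1 else 1)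
      else run.getD key 0 := by
  unfold pvStep
  by_cases hkey : key = (d.1, d.2, r, c)
  · rw [if_pos hkey]
    split_ifs with h1 h2 <;> rw [PySem.Dict.getD_insert, if_pos hkey]
  · rw [if_neg hkey]
    split_ifs <;> rw [PySem.Dict.getD_insert, if_neg hkey]

-- cells already processed by B's table-building pass, column-major
abbrev pvDone (h C ρ r c : Int) : Prop := 0 ≤ r ∧ r < h ∧ 0 ≤ c ∧ (c < C ∨ (c = C ∧ r < ρ))

-- the table agrees with pvR on processed cells and is unset elsewhere
def pvInv (board : List (List Int)) (h w : Int)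
    (run : PySem.Dict (Int × Int × Int × Int) Int) (C ρ : Int) : Prop :=
  ∀ k : Nat, k < 4 → ∀ r c : Int,
    run.getD ((pvDir k).1, (pvDir k).2, r, c) 0 =
      if pvDone h C ρ r c then pvR board h w k r c else 0

lemma pvInv_cell (board : List (List Int)) (h w : Int)
    (run : PySem.Dict (Int × Int × Int × Int) Int) (C ρ : Int)
    (hC : 0 ≤ C ∧ C < w) (hρ : 0 ≤ ρ ∧ ρ < h)
    (hinv : pvInv board h w run C ρ) :
    pvInv board h w (pvDirs.foldl (pvStep board h w ρ C) run) C (ρ + 1) := by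
  intro k hk r c
  simp only [pvDirs, List.foldl_cons, List.foldl_nil]
  simp only [getD_pvStep]
  by_cases hrc : r = ρ ∧ c = C
  · obtain ⟨rfl, rfl⟩ := hrc
    interval_cases k
    · -- direction ('0', '1')
      have hD : pvDone h c (r + 1) r c := ⟨hρ.1, hρ.2, hC.1, Or.inr ⟨rfl, by omega⟩⟩
      rw [if_pos hD, pvR_eq]
      have hd : pvDir 0 = ((0 : Int), (1 : Int)) := rfl
      simp only [hd]
      rw [if_pos (show (0:Int) ≤ r ∧ r < h ∧ 0 ≤ c ∧ c < w from ⟨hρ.1, hρ.2, hC.1, hC.2⟩)]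
      have h0 := hinv 0 (by norm_num) (r) (c - 1)
      simp only [hd] at h0
      norm_num [Prod.ext_iff] at h0 ⊢
      split_ifs with hv hg
      · rfl
      · rw [h0, if_pos (show pvDone h c r (r) (c - 1) from by
          refine ⟨by omega, by omega, by omega, Or.inl (by omega)⟩)]
      · rfl
    · -- direction ('1', '0')
      have hD : pvDone h c (r + 1) r c := ⟨hρ.1, hρ.2, hC.1, Or.inr ⟨rfl, by omega⟩⟩
      rw [if_pos hD, pvR_eq]
      have hd : pvDir 1 = ((1 : Int), (0 : Int)) := rfl
      simp only [hd]
      rw [if_pos (show (0:Int) ≤ r ∧ r < h ∧ 0 ≤ c ∧ c < w from ⟨hρ.1, hρ.2, hC.1, hC.2⟩)]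
      have h0 := hinv 1 (by norm_num) (r - 1) (c)
      simp only [hd] at h0
      norm_num [Prod.ext_iff] at h0 ⊢
      split_ifs with hv hg
      · rfl
      · rw [h0, if_pos (show pvDone h c r (r - 1) (c) from by
          refine ⟨by omega, by omega, by omega, Or.inr ⟨by omega, by omega⟩⟩)]
      · rfl
    · -- direction ('1', '1')
      have hD : pvDone h c (r + 1) r c := ⟨hρ.1, hρ.2, hC.1, Or.inr ⟨rfl, by omega⟩⟩
      rw [if_pos hD, pvR_eq]
      have hd : pvDir 2 = ((1 : Int), (1 : Int)) := rfl
      simp only [hd]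
      rw [if_pos (show (0:Int) ≤ r ∧ r < h ∧ 0 ≤ c ∧ c < w from ⟨hρ.1, hρ.2, hC.1, hC.2⟩)]
      have h0 := hinv 2 (by norm_num) (r - 1) (c - 1)
      simp only [hd] at h0
      norm_num [Prod.ext_iff] at h0 ⊢
      split_ifs with hv hg
      · rfl
      · rw [h0, if_pos (show pvDone h c r (r - 1) (c - 1) from by
          refine ⟨by omega, by omega, by omega, Or.inl (by omega)⟩)]
      · rfl
    · -- direction ('-1', '1')
      have hD : pvDone h c (r + 1) r c := ⟨hρ.1, hρ.2, hC.1, Or.inr ⟨rfl, by omega⟩⟩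
      rw [if_pos hD, pvR_eq]
      have hd : pvDir 3 = ((-1 : Int), (1 : Int)) := rfl
      simp only [hd]
      rw [if_pos (show (0:Int) ≤ r ∧ r < h ∧ 0 ≤ c ∧ c < w from ⟨hρ.1, hρ.2, hC.1, hC.2⟩)]
      have h0 := hinv 3 (by norm_num) (r + 1) (c - 1)
      simp only [hd] at h0
      norm_num [Prod.ext_iff] at h0 ⊢
      split_ifs with hv hg
      · rfl
      · rw [h0, if_pos (show pvDone h c r (r + 1) (c - 1) from by
          refine ⟨by omega, by omega, by omega, Or.inl (by omega)⟩)]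
      · rfl
  · have hKne : ∀ a b : Int, ¬(((pvDir k).1, (pvDir k).2, r, c) = (a, b, ρ, C)) := by
      intro a b hEq
      apply hrc
      have h2 := congrArg (fun t : Int × Int × Int × Int => (t.2.2.1, t.2.2.2)) hEq
      simp at h2
      exact h2
    rw [if_neg (hKne _ _), if_neg (hKne _ _), if_neg (hKne _ _), if_neg (hKne _ _)]
    rw [hinv k hk r c]
    have hiff : pvDone h C ρ r c ↔ pvDone h C (ρ + 1) r c := by
      rcases not_and_or.mp hrc with h' | h' <;> unfold pvDone <;>
        constructor <;> intro <;> omega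
    exact if_congr hiff rfl rfl

lemma pvInv_rows (board : List (List Int)) (h w C : Int) (hC : 0 ≤ C ∧ C < w) :
    ∀ (m : Nat) (ρ : Int) (run : PySem.Dict (Int × Int × Int × Int) Int),
      (h - ρ).toNat = m → 0 ≤ ρ → ρ ≤ h → pvInv board h w run C ρ →
      pvInv board h w ((PySem.List.pyRange ρ h 1).foldl
        (fun run r => pvDirs.foldl (pvStep board h w r C) run) run) C h := by
  intro m
  induction m with
  | zero =>
    intro ρ run hm h0 h1 hinv
    have hρh : ρ = h := by omega
    rw [PySem.List.pyRange_one_eq_nil (by omega)]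
    simpa [hρh] using hinv
  | succ m ih =>
    intro ρ run hm h0 h1 hinv
    rw [PySem.List.pyRange_one_cons (by omega), List.foldl_cons]
    exact ih (ρ + 1) _ (by omega) (by omega) (by omega)
      (pvInv_cell board h w run C ρ hC ⟨h0, by omega⟩ hinv)

lemma pvInv_shift (board : List (List Int)) (h w C : Int)
    (run : PySem.Dict (Int × Int × Int × Int) Int)
    (hinv : pvInv board h w run C h) : pvInv board h w run (C + 1) 0 := by
  intro k hk r c
  rw [hinv k hk r c]
  have hiff : pvDone h C h r c ↔ pvDone h (C + 1) 0 r c := by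
    unfold pvDone; constructor <;> intro <;> omega
  exact if_congr hiff rfl rfl

lemma pvInv_cols (board : List (List Int)) (h w : Int) (hh : 0 ≤ h) :
    ∀ (m : Nat) (C : Int) (run : PySem.Dict (Int × Int × Int × Int) Int),
      (w - C).toNat = m → 0 ≤ C → C ≤ w → pvInv board h w run C 0 →
      pvInv board h w ((PySem.List.pyRange C w 1).foldl
        (fun run c => (PySem.List.pyRange 0 h 1).foldl
          (fun run r => pvDirs.foldl (pvStep board h w r c) run) run) run) w 0 := by
  intro m
  induction m with
  | zero =>
    intro C run hm h0 h1 hinv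
    have hCw : C = w := by omega
    rw [PySem.List.pyRange_one_eq_nil (show w ≤ C by omega)]
    simpa [hCw] using hinv
  | succ m ih =>
    intro C run hm h0 h1 hinv
    rw [PySem.List.pyRange_one_cons (show C < w by omega), List.foldl_cons]
    refine ih (C + 1) _ (by omega) (by omega) (by omega) ?_
    exact pvInv_shift board h w C _
      (pvInv_rows board h w C ⟨h0, by omega⟩ (h - 0).toNat 0 run rfl (by omega) hh hinv)

lemma pvBuild_getD (board : List (List Int)) (h w : Int) (hh : 0 ≤ h) (hw : 0 ≤ w)
    (k : Nat) (hk : k < 4) (r c : Int) (hin : 0 ≤ r ∧ r < h ∧ 0 ≤ c ∧ c < w) :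
    (pvBuild board h w).getD ((pvDir k).1, (pvDir k).2, r, c) 0 = pvR board h w k r c := by
  have hinv0 : pvInv board h w PySem.Dict.empty 0 0 := by
    intro k' hk' r' c'
    rw [PySem.Dict.getD_empty]
    have : ¬ pvDone h 0 0 r' c' := by unfold pvDone; omega
    rw [if_neg this]
  have := pvInv_cols board h w hh (w - 0).toNat 0 PySem.Dict.empty rfl (by omega) hw hinv0
    k hk r c
  unfold pvBuild
  rw [this, if_pos (show pvDone h w 0 r c from ⟨hin.1, hin.2.1, hin.2.2.1, Or.inl hin.2.2.2⟩)]

lemma pvChain0 (board : List (List Int)) (h w r c : Int)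
    (hr : 0 ≤ r ∧ r < h) (hc : 0 ≤ c ∧ c + 3 < w) :
    4 ≤ pvR board h w 0 r (c + 3) ↔
      (pvCell board r c = pvCell board r (c+1) ∧ pvCell board r (c+1) = pvCell board r (c+2) ∧
       pvCell board r (c+2) = pvCell board r (c+3) ∧ pvCell board r (c+3) ≠ 0) := by
  rw [pvR_ge_iff board h w 0 r (c + 3) 4 (by norm_num)]
  rw [pvR_ge_iff board h w 0 (r - (pvDir 0).1) (c + 3 - (pvDir 0).2) (4 - 1) (by norm_num)]
  rw [pvR_ge_iff board h w 0 (r - (pvDir 0).1 - (pvDir 0).1) (c + 3 - (pvDir 0).2 - (pvDir 0).2)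
      (4 - 1 - 1) (by norm_num)]
  rw [pvR_ge_iff board h w 0 (r - (pvDir 0).1 - (pvDir 0).1 - (pvDir 0).1)
      (c + 3 - (pvDir 0).2 - (pvDir 0).2 - (pvDir 0).2) (4 - 1 - 1 - 1) (by norm_num)]
  simp only [show pvDir 0 = ((0 : Int), (1 : Int)) from rfl]
  norm_num
  have e1 : c + 3 - 1 = c + 2 := by ring
  have e2 : c + 2 - 1 = c + 1 := by ring
  have e3 : c + 1 - 1 = c := by ring
  rw [e1, e2, e3]
  omega

lemma pvChain1 (board : List (List Int)) (h w r c : Int)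
    (hr : 0 ≤ r ∧ r + 3 < h) (hc : 0 ≤ c ∧ c < w) :
    4 ≤ pvR board h w 1 (r + 3) c ↔
      (pvCell board r c = pvCell board (r+1) c ∧ pvCell board (r+1) c = pvCell board (r+2) c ∧
       pvCell board (r+2) c = pvCell board (r+3) c ∧ pvCell board (r+3) c ≠ 0) := by
  rw [pvR_ge_iff board h w 1 (r + 3) c 4 (by norm_num)]
  rw [pvR_ge_iff board h w 1 (r + 3 - (pvDir 1).1) (c - (pvDir 1).2) (4 - 1) (by norm_num)]
  rw [pvR_ge_iff board h w 1 (r + 3 - (pvDir 1).1 - (pvDir 1).1) (c - (pvDir 1).2 - (pvDir 1).2)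
      (4 - 1 - 1) (by norm_num)]
  rw [pvR_ge_iff board h w 1 (r + 3 - (pvDir 1).1 - (pvDir 1).1 - (pvDir 1).1)
      (c - (pvDir 1).2 - (pvDir 1).2 - (pvDir 1).2) (4 - 1 - 1 - 1) (by norm_num)]
  simp only [show pvDir 1 = ((1 : Int), (0 : Int)) from rfl]
  norm_num
  have e1 : r + 3 - 1 = r + 2 := by ring
  have e2 : r + 2 - 1 = r + 1 := by ring
  have e3 : r + 1 - 1 = r := by ring
  rw [e1, e2, e3]
  omega

lemma pvChain2 (board : List (List Int)) (h w r c : Int)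
    (hr : 0 ≤ r ∧ r + 3 < h) (hc : 0 ≤ c ∧ c + 3 < w) :
    4 ≤ pvR board h w 2 (r + 3) (c + 3) ↔
      (pvCell board r c = pvCell board (r+1) (c+1) ∧ pvCell board (r+1) (c+1) = pvCell board (r+2) (c+2) ∧
       pvCell board (r+2) (c+2) = pvCell board (r+3) (c+3) ∧ pvCell board (r+3) (c+3) ≠ 0) := by
  rw [pvR_ge_iff board h w 2 (r + 3) (c + 3) 4 (by norm_num)]
  rw [pvR_ge_iff board h w 2 (r + 3 - (pvDir 2).1) (c + 3 - (pvDir 2).2) (4 - 1) (by norm_num)]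
  rw [pvR_ge_iff board h w 2 (r + 3 - (pvDir 2).1 - (pvDir 2).1) (c + 3 - (pvDir 2).2 - (pvDir 2).2)
      (4 - 1 - 1) (by norm_num)]
  rw [pvR_ge_iff board h w 2 (r + 3 - (pvDir 2).1 - (pvDir 2).1 - (pvDir 2).1)
      (c + 3 - (pvDir 2).2 - (pvDir 2).2 - (pvDir 2).2) (4 - 1 - 1 - 1) (by norm_num)]
  simp only [show pvDir 2 = ((1 : Int), (1 : Int)) from rfl]
  norm_num
  have e1 : r + 3 - 1 = r + 2 := by ring
  have e2 : r + 2 - 1 = r + 1 := by ring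
  have e3 : r + 1 - 1 = r := by ring
  have f1 : c + 3 - 1 = c + 2 := by ring
  have f2 : c + 2 - 1 = c + 1 := by ring
  have f3 : c + 1 - 1 = c := by ring
  rw [e1, e2, e3, f1, f2, f3]
  omega

lemma pvChain3 (board : List (List Int)) (h w r c : Int)
    (hr : 3 ≤ r ∧ r < h) (hc : 0 ≤ c ∧ c + 3 < w) :
    4 ≤ pvR board h w 3 (r - 3) (c + 3) ↔
      (pvCell board r c = pvCell board (r-1) (c+1) ∧ pvCell board (r-1) (c+1) = pvCell board (r-2) (c+2) ∧
       pvCell board (r-2) (c+2) = pvCell board (r-3) (c+3) ∧ pvCell board (r-3) (c+3) ≠ 0) := by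
  rw [pvR_ge_iff board h w 3 (r - 3) (c + 3) 4 (by norm_num)]
  rw [pvR_ge_iff board h w 3 (r - 3 - (pvDir 3).1) (c + 3 - (pvDir 3).2) (4 - 1) (by norm_num)]
  rw [pvR_ge_iff board h w 3 (r - 3 - (pvDir 3).1 - (pvDir 3).1) (c + 3 - (pvDir 3).2 - (pvDir 3).2)
      (4 - 1 - 1) (by norm_num)]
  rw [pvR_ge_iff board h w 3 (r - 3 - (pvDir 3).1 - (pvDir 3).1 - (pvDir 3).1)
      (c + 3 - (pvDir 3).2 - (pvDir 3).2 - (pvDir 3).2) (4 - 1 - 1 - 1) (by norm_num)]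
  simp only [show pvDir 3 = ((-1 : Int), (1 : Int)) from rfl]
  norm_num
  have e1 : r - 3 + 1 = r - 2 := by ring
  have e2 : r - 2 + 1 = r - 1 := by ring
  have e3 : r - 1 + 1 = r := by ring
  have f1 : c + 3 - 1 = c + 2 := by ring
  have f2 : c + 2 - 1 = c + 1 := by ring
  have f3 : c + 1 - 1 = c := by ring
  rw [e1, e2, e3, f1, f2, f3]
  omega

lemma pvPassEq (cs rs : List Int)
    (P Q : Int → Int → Prop) [∀ r c, Decidable (P r c)] [∀ r c, Decidable (Q r c)]
    (e : Int → Int → Int × Int)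
    (hPQ : ∀ c ∈ cs, ∀ r ∈ rs, (P r c ↔ Q r c)) :
    ∀ init : PySem.Set (Int × Int),
      cs.foldl (fun w c => rs.foldl (fun w r =>
        if P r c then PySem.Set.add (PySem.Set.add w (r, c)) (e r c) else w) w) init =
      cs.foldl (fun w c => rs.foldl (fun w r =>
        if Q r c then PySem.Set.add (PySem.Set.add w (r, c)) (e r c) else w) w) init := by
  intro init
  apply PySem.List.foldl_congr_mem
  intro acc c hc
  apply PySem.List.foldl_congr_mem
  intro acc' r hr
  exact if_congr (hPQ c hc r hr) rfl rfl

theorem four_in_line_spec : Claim_equal_four_in_line := by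
  intro board _ _
  unfold Spec_four_in_line four_in_line four_in_line_alt
  simp only [pvDirs, List.foldl_cons, List.foldl_nil]
  norm_num [Prod.ext_iff]
  simp only [← sub_eq_add_neg]
  have hh : (0:Int) ≤ (board.length : Int) := Int.natCast_nonneg _
  have hw : (0:Int) ≤ ((PySem.List.pyGetD board 0 []).length : Int) := Int.natCast_nonneg _
  have h1 : ∀ c ∈ PySem.List.pyRange 0 (((PySem.List.pyGetD board 0 []).length : Int) - 3) 1,
      ∀ r ∈ PySem.List.pyRange 0 (board.length : Int) 1,
      ((pvCell board r c = pvCell board r (c+1) ∧ pvCell board r (c+1) = pvCell board r (c+2) ∧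
        pvCell board r (c+2) = pvCell board r (c+3) ∧ ¬pvCell board r (c+3) = 0) ↔
       4 ≤ (pvBuild board (board.length : Int) ((PySem.List.pyGetD board 0 []).length : Int)).getD
             ((0:Int), (1:Int), r, c + 3) 0) := by
    intro c hc r hr
    rw [PySem.List.mem_pyRange_one] at hc hr
    have hg : (pvBuild board (board.length : Int) ((PySem.List.pyGetD board 0 []).length : Int)).getD
        ((0:Int), (1:Int), r, c + 3) 0 =
        pvR board (board.length : Int) ((PySem.List.pyGetD board 0 []).length : Int) 0 r (c + 3) :=
      pvBuild_getD board _ _ hh hw 0 (by norm_num) r (c + 3) ⟨hr.1, hr.2, by omega, by omega⟩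
    rw [hg]
    exact (pvChain0 board _ _ r c ⟨hr.1, hr.2⟩ ⟨hc.1, by omega⟩).symm
  have h2 : ∀ c ∈ PySem.List.pyRange 0 ((PySem.List.pyGetD board 0 []).length : Int) 1,
      ∀ r ∈ PySem.List.pyRange 0 ((board.length : Int) - 3) 1,
      ((pvCell board r c = pvCell board (r+1) c ∧ pvCell board (r+1) c = pvCell board (r+2) c ∧
        pvCell board (r+2) c = pvCell board (r+3) c ∧ ¬pvCell board (r+3) c = 0) ↔
       4 ≤ (pvBuild board (board.length : Int) ((PySem.List.pyGetD board 0 []).length : Int)).getD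
             ((1:Int), (0:Int), r + 3, c) 0) := by
    intro c hc r hr
    rw [PySem.List.mem_pyRange_one] at hc hr
    have hg : (pvBuild board (board.length : Int) ((PySem.List.pyGetD board 0 []).length : Int)).getD
        ((1:Int), (0:Int), r + 3, c) 0 =
        pvR board (board.length : Int) ((PySem.List.pyGetD board 0 []).length : Int) 1 (r + 3) c :=
      pvBuild_getD board _ _ hh hw 1 (by norm_num) (r + 3) c ⟨by omega, by omega, hc.1, hc.2⟩
    rw [hg]
    exact (pvChain1 board _ _ r c ⟨hr.1, by omega⟩ ⟨hc.1, hc.2⟩).symm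
  have h3 : ∀ c ∈ PySem.List.pyRange 0 (((PySem.List.pyGetD board 0 []).length : Int) - 3) 1,
      ∀ r ∈ PySem.List.pyRange 0 ((board.length : Int) - 3) 1,
      ((pvCell board r c = pvCell board (r+1) (c+1) ∧ pvCell board (r+1) (c+1) = pvCell board (r+2) (c+2) ∧
        pvCell board (r+2) (c+2) = pvCell board (r+3) (c+3) ∧ ¬pvCell board (r+3) (c+3) = 0) ↔
       4 ≤ (pvBuild board (board.length : Int) ((PySem.List.pyGetD board 0 []).length : Int)).getD
             ((1:Int), (1:Int), r + 3, c + 3) 0) := by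
    intro c hc r hr
    rw [PySem.List.mem_pyRange_one] at hc hr
    have hg : (pvBuild board (board.length : Int) ((PySem.List.pyGetD board 0 []).length : Int)).getD
        ((1:Int), (1:Int), r + 3, c + 3) 0 =
        pvR board (board.length : Int) ((PySem.List.pyGetD board 0 []).length : Int) 2 (r + 3) (c + 3) :=
      pvBuild_getD board _ _ hh hw 2 (by norm_num) (r + 3) (c + 3) ⟨by omega, by omega, by omega, by omega⟩
    rw [hg]
    exact (pvChain2 board _ _ r c ⟨hr.1, by omega⟩ ⟨hc.1, by omega⟩).symm
  have h4 : ∀ c ∈ PySem.List.pyRange 0 (((PySem.List.pyGetD board 0 []).length : Int) - 3) 1,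
      ∀ r ∈ PySem.List.pyRange 3 (board.length : Int) 1,
      ((pvCell board r c = pvCell board (r-1) (c+1) ∧ pvCell board (r-1) (c+1) = pvCell board (r-2) (c+2) ∧
        pvCell board (r-2) (c+2) = pvCell board (r-3) (c+3) ∧ ¬pvCell board (r-3) (c+3) = 0) ↔
       4 ≤ (pvBuild board (board.length : Int) ((PySem.List.pyGetD board 0 []).length : Int)).getD
             ((-1:Int), (1:Int), r - 3, c + 3) 0) := by
    intro c hc r hr
    rw [PySem.List.mem_pyRange_one] at hc hr
    have hg : (pvBuild board (board.length : Int) ((PySem.List.pyGetD board 0 []).length : Int)).getD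
        ((-1:Int), (1:Int), r - 3, c + 3) 0 =
        pvR board (board.length : Int) ((PySem.List.pyGetD board 0 []).length : Int) 3 (r - 3) (c + 3) :=
      pvBuild_getD board _ _ hh hw 3 (by norm_num) (r - 3) (c + 3) ⟨by omega, by omega, by omega, by omega⟩
    rw [hg]
    exact (pvChain3 board _ _ r c ⟨hr.1, hr.2⟩ ⟨hc.1, by omega⟩).symm
  rw [pvPassEq _ _ _ _ _ h1, pvPassEq _ _ _ _ _ h2, pvPassEq _ _ _ _ _ h3, pvPassEq _ _ _ _ _ h4]
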